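-- pv_equiv track=rewrite | github.com/ybear90/Backjoon_Online_Judge | KOI_Contest/2017/Label_game.py | winner_print
-- ===== SOURCE A (Python) =====
-- def winner_print(A, B, num):
--     # winner_a = 0
--     # winner_b = 0
--     if A[num] > B[num]:
--         return 'A'
--     elif A[num] < B[num]:
--         return 'B'
--     else:
--         if num == 1:
--             return 'D'
--         return winner_print(A, B, num - 1)
-- ===== SOURCE B (Python) =====
-- def winner_print(A, B, num):
--     # Walk downward past the tied rounds, then one comparison decides.
--     i = num
--     while A[i] == B[i] and i != 1:
--         i -= 1
--     if A[i] > B[i]: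
--         return 'A'
--     if A[i] < B[i]:
--         return 'B'
--     return 'D'
-- ===== Notes on version B (the rewrite author's own statement) =====
-- stated objective: simpler
-- what changed: Replaces the recursion, which decides the winner inside every step, with an explicit while loop that only walks past the tied rounds and a single three-way comparison at the stopping index afterwards.
import Mathlib
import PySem

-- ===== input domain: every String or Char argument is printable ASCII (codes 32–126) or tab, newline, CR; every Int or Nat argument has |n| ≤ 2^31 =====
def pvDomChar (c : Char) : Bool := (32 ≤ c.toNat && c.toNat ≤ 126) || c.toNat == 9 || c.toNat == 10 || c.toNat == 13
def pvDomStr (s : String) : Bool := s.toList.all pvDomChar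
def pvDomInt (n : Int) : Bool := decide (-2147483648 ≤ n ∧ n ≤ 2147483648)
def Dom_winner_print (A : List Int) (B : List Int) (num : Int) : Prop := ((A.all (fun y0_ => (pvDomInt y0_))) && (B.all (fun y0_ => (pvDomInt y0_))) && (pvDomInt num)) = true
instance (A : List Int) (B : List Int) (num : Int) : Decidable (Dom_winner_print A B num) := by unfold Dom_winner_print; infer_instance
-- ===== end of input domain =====

-- B replaces the recursion that decides the winner inside every step with a
-- while loop that only walks past the tied rounds plus one final three-way
-- comparison (objective: simpler).

-- ===== PORT A =====
-- Literal transliteration of A's recursion; the Nat argument is pure fuel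
-- (the chosen amount always outlasts the scan), and the `none` index case is
-- Python's IndexError ("D" is a placeholder never claimed about).
def winnerGo (A : List Int) (B : List Int) : Int → Nat → String
  | _, 0 => "D"
  | num, fuel + 1 =>
    match PySem.List.pyGet? A num, PySem.List.pyGet? B num with
    | some a, some b =>
      if a > b then "A"
      else if a < b then "B"
      else if num = 1 then "D"
      else winnerGo A B (num - 1) fuel
    | _, _ => "D"

def winner_print (A : List Int) (B : List Int) (num : Int) : String :=
  winnerGo A B num (num.toNat + A.length + B.length + 2)

-- ===== PORT B =====
-- Source B's while loop: returns the index i at which the loop stops (first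
-- unequal round, round 1, or — Python's IndexError — an out-of-range index).
def altLoop (A : List Int) (B : List Int) : Int → Nat → Int
  | i, 0 => i
  | i, fuel + 1 =>
    match PySem.List.pyGet? A i, PySem.List.pyGet? B i with
    | some x, some y => if x = y ∧ i ≠ 1 then altLoop A B (i - 1) fuel else i
    | _, _ => i

-- Source B's trailing if-chain: the three-way comparison at the stopping index.
def altDecide (A : List Int) (B : List Int) (i : Int) : String :=
  match PySem.List.pyGet? A i, PySem.List.pyGet? B i with
  | some x, some y => if x > y then "A" else if x < y then "B" else "D"
  | _, _ => "D"

def winner_print_alt (A : List Int) (B : List Int) (num : Int) : String :=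
  altDecide A B (altLoop A B num (num.toNat + A.length + B.length + 2))

-- ===== PRECONDITION & SPEC =====
-- Pre_ is exactly where the Python A returns (no IndexError): either a round
-- label 1 ≤ num inside both lists, or num ≤ 0 with some compared pair
-- differing before the descending scan runs off the front of the shorter list.
def Pre_winner_print (A : List Int) (B : List Int) (num : Int) : Prop :=
  (1 ≤ num ∧ num < A.length ∧ num < B.length) ∨
  (num ≤ 0 ∧ 0 < min A.length B.length ∧
    ∃ k < (num + min A.length B.length + 1).toNat,
      PySem.List.pyGet? A (num - (k : Int)) ≠ PySem.List.pyGet? B (num - (k : Int)))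
instance (A : List Int) (B : List Int) (num : Int) : Decidable (Pre_winner_print A B num) := by unfold Pre_winner_print; infer_instance

def pvWitness_winner_print : List Int × List Int × Int := ([0, 1], [0, 2], 1)

def Spec_winner_print (A : List Int) (B : List Int) (num : Int) (out : String) : Prop := out = winner_print_alt A B num
instance (A : List Int) (B : List Int) (num : Int) (out : String) : Decidable (Spec_winner_print A B num out) := by unfold Spec_winner_print; infer_instance

-- ===== CLAIM =====
def Claim_equal_winner_print : Prop := ∀ (A : List Int) (B : List Int) (num : Int), Dom_winner_print A B num → Pre_winner_print A B num → Spec_winner_print A B num (winner_print A B num)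

-- ===== LEMMAS AND PROOFS =====

-- Whenever the fuel outlasts the scan (num steps from a positive num; at most
-- |A|+num more steps from a non-positive one before the index leaves range),
-- the recursion equals "decide at the loop's stopping index".
lemma go_eq_loop (A B : List Int) : ∀ (fuel : Nat) (num : Int),
    (num ≤ 0 → (A.length : Int) + num < fuel) → (1 ≤ num → num < fuel) →
    winnerGo A B num fuel = altDecide A B (altLoop A B num fuel) := by
  intro fuel
  induction fuel with
  | zero =>
    intro num h0 h1
    have hnp : num ≤ 0 := by by_contra h; have := h1 (by omega); omega
    have hnone : PySem.List.pyGet? A num = none := by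
      rw [PySem.List.pyGet?_eq_none_iff]
      intro hin
      rcases hin with ⟨hlo, _⟩
      have := h0 hnp
      simp at this
      omega
    simp [winnerGo, altLoop, altDecide, hnone]
  | succ f ih =>
    intro num h0 h1
    show (match PySem.List.pyGet? A num, PySem.List.pyGet? B num with
      | some a, some b =>
        if a > b then "A"
        else if a < b then "B"
        else if num = 1 then "D"
        else winnerGo A B (num - 1) f
      | _, _ => "D")
      = altDecide A B (altLoop A B num (f + 1))
    match hA : PySem.List.pyGet? A num, hB : PySem.List.pyGet? B num with
    | none, _ =>
      simp only [altLoop, hA, altDecide]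
    | some a, none =>
      simp only [altLoop, hA, hB, altDecide]
    | some a, some b =>
      by_cases hgt : a > b
      · have hstop : altLoop A B num (f + 1) = num := by
          simp [altLoop, hA, hB, ne_of_gt hgt]
        rw [hstop]
        simp [altDecide, hA, hB, hgt]
      · by_cases hlt : a < b
        · have hstop : altLoop A B num (f + 1) = num := by
            simp [altLoop, hA, hB, ne_of_lt hlt]
          rw [hstop]
          simp [altDecide, hA, hB, hlt, not_lt.mpr hlt.le]
        · have heq : a = b := le_antisymm (not_lt.mp hgt) (not_lt.mp hlt)
          by_cases h1' : num = 1
          · subst h1'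
            have hstop : altLoop A B 1 (f + 1) = 1 := by
              simp [altLoop, hA, hB]
            rw [hstop]
            simp [altDecide, hA, hB, hgt, hlt]
          · have hstep : altLoop A B num (f + 1) = altLoop A B (num - 1) f := by
              simp [altLoop, hA, hB, heq, h1']
            rw [hstep]
            simp only [if_neg hgt, if_neg hlt, if_neg h1', gt_iff_lt]
            have hh0 : num - 1 ≤ 0 → (A.length : Int) + (num - 1) < (f : Int) := by
              intro hh
              by_cases h : num ≤ 0
              · have := h0 h; omega
              · omega
            have hh1 : 1 ≤ num - 1 → (num - 1 : Int) < (f : Int) := by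
              intro hh
              have := h1 (by omega)
              omega
            exact ih (num - 1) hh0 hh1

-- ===== VERDICT =====
theorem winner_print_spec : Claim_equal_winner_print := by
  intro A B num _hdom _hpre
  show winner_print A B num = winner_print_alt A B num
  unfold winner_print winner_print_alt
  exact go_eq_loop A B _ num (by intro _; omega) (by intro h; omega)
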